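-- pv_equiv track=rewrite | github.com/justbetheleaf/Proyecto2 | Funciones_Pryecto1_equipo2.py | formarRegion
-- ===== SOURCE A (Python) =====
-- def formarRegion(matriz):
--     tamano = 3 if len(matriz) == 9 else 2 #define la cantidad horizontal de cuadrantes que tenemos
--     resultado = ""
--
--     for fila in range(len(matriz)):
--         if fila % tamano == 0 and fila != 0:
--             resultado += "- " * int((tamano * tamano)+(len(matriz)/tamano)-1) + "\n" # separa con línea de guiones para separar las regiones
--
--         for columna in range(len(matriz[fila])):
--             if columna % tamano == 0 and columna != 0:
--                 resultado += "| " # Para separar las regiones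
--             resultado += str(matriz[fila][columna]) + " "
--
--         resultado += "\n"
--
--     return resultado
-- ===== SOURCE B (Python) =====
-- def formarRegion(matriz):
--     n = len(matriz)
--     tamano = 3 if n == 9 else 2
--     sep = "- " * int((tamano * tamano) + (n / tamano) - 1) + "\n"
--
--     def chunks(xs):
--         return [xs[i:i + tamano] for i in range(0, len(xs), tamano)]
--
--     lines = ["| ".join("".join(str(c) + " " for c in ch) for ch in chunks(fila)) + "\n"
--              for fila in matriz]
--     return sep.join("".join(block) for block in chunks(lines))
-- ===== Notes on version B (the rewrite author's own statement) =====
-- stated objective: simpler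
-- what changed: Replaces the per-index modulo tests inside nested loops by slicing each row (and the list of row lines) into chunks of size tamano and joining them with '| ' / the dash-separator line.
import Mathlib
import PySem

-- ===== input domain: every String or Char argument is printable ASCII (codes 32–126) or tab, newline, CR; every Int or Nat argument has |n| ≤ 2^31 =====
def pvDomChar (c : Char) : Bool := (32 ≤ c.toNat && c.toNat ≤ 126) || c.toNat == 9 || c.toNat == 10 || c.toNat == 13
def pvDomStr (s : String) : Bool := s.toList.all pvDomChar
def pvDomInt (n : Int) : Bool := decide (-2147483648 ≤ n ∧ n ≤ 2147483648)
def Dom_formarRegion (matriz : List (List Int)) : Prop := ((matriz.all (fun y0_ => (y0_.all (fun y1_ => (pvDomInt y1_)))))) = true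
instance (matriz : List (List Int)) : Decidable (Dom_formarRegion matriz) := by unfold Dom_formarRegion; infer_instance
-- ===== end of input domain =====

-- B formats the grid by slicing rows (and the list of row lines) into chunks of size
-- tamano joined with "| " / the dash line, instead of A's per-index modulo tests (simpler decomposition).

-- ===== PORT A =====
-- "- " * k  (Python string repetition; empty for k ≤ 0)
def pvRepeat (s : String) (k : Int) : String := PySem.Str.join "" (List.replicate k.toNat s)

-- int((tamano*tamano)+(len(matriz)/tamano)-1): the float division n/tamano is exact or a half
-- (tamano = 3 only when n = 9; n/2 has exact halves), and int() truncation of this nonnegative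
-- value is its floor, so the expression equals tamano*tamano + n//tamano - 1 — ported with floordiv (exact here).
def formarRegion (matriz : List (List Int)) : String :=
  let tamano : Int := if matriz.length = 9 then 3 else 2
  (PySem.List.pyRange 0 (matriz.length : Int) 1).foldl
    (fun resultado fila =>
      let resultado :=
        if PySem.Int.mod fila tamano = 0 ∧ fila ≠ 0 then
          resultado ++ pvRepeat "- " (tamano * tamano + PySem.Int.floordiv (matriz.length : Int) tamano - 1) ++ "\n"
        else resultado
      let filaL := PySem.List.pyGetD matriz fila []
      let resultado :=
        (PySem.List.pyRange 0 (filaL.length : Int) 1).foldl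
          (fun res columna =>
            let res := if PySem.Int.mod columna tamano = 0 ∧ columna ≠ 0 then res ++ "| " else res
            res ++ PySem.Int.toStr (PySem.List.pyGetD filaL columna 0) ++ " ")
          resultado
      resultado ++ "\n")
    ""

-- ===== PORT B =====
-- [xs[i:i+tamano] for i in range(0, len(xs), tamano)]
def pvChunks {α : Type} (t : Int) (xs : List α) : List (List α) :=
  (PySem.List.pyRange 0 (xs.length : Int) t).map
    (fun i => PySem.List.slice xs (some i) (some (i + t)))

def formarRegion_alt (matriz : List (List Int)) : String :=
  let n : Int := (matriz.length : Int)
  let tamano : Int := if matriz.length = 9 then 3 else 2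
  let sep := pvRepeat "- " (tamano * tamano + PySem.Int.floordiv n tamano - 1) ++ "\n"
  let lines := matriz.map (fun fila =>
    PySem.Str.join "| " ((pvChunks tamano fila).map (fun ch =>
      PySem.Str.join "" (ch.map (fun c => PySem.Int.toStr c ++ " ")))) ++ "\n")
  PySem.Str.join sep ((pvChunks tamano lines).map (fun block => PySem.Str.join "" block))

-- ===== PRECONDITION & SPEC =====
def Spec_formarRegion (matriz : List (List Int)) (out : String) : Prop := out = formarRegion_alt matriz
instance (matriz : List (List Int)) (out : String) : Decidable (Spec_formarRegion matriz out) := by unfold Spec_formarRegion; infer_instance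

-- ===== CLAIM (what is proved, stated in full; the proofs are below) =====
def Claim_equal_formarRegion : Prop := ∀ (matriz : List (List Int)), Dom_formarRegion matriz → Spec_formarRegion matriz (formarRegion matriz)

-- ===== LEMMAS AND PROOFS =====

-- String facts via toList
theorem pv_str_ext {s t : String} (h : s.toList = t.toList) : s = t := String.toList_inj.mp h

theorem pv_append_empty (s : String) : s ++ "" = s := by
  apply pv_str_ext; simp

theorem pv_empty_append (s : String) : "" ++ s = s := by
  apply pv_str_ext; simp

theorem pv_join_nil (sep : String) : PySem.Str.join sep [] = "" := by
  apply pv_str_ext; simp [PySem.Str.toList_join, PySem.Chars.join, List.intercalate]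

theorem pv_join_singleton (sep x : String) : PySem.Str.join sep [x] = x := by
  apply pv_str_ext
  simp [PySem.Str.toList_join, PySem.Chars.join, List.intercalate, List.intersperse]

theorem pv_join_empty_cons (x : String) (l : List String) :
    PySem.Str.join "" (x :: l) = x ++ PySem.Str.join "" l := by
  apply pv_str_ext
  cases l <;>
    simp [PySem.Str.toList_join, PySem.Chars.join, List.intercalate, List.intersperse]

theorem pv_join_cons_ne (sep x : String) (l : List String) (h : l ≠ []) :
    PySem.Str.join sep (x :: l) = x ++ sep ++ PySem.Str.join sep l := by
  apply pv_str_ext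
  cases l with
  | nil => exact absurd rfl h
  | cons a as =>
    simp [PySem.Str.toList_join, PySem.Chars.join, List.intercalate, List.intersperse]

theorem pv_map_fst_zipIdx {α : Type} (l : List α) : ∀ (a : Nat), (l.zipIdx a).map Prod.fst = l := by
  induction l with
  | nil => intro a; simp
  | cons x xs ih => intro a; simp [List.zipIdx_cons, ih]

-- recursive chunking (proof-side mirror of pvChunks)
def chunksRec {α : Type} (t : Nat) (xs : List α) : List (List α) :=
  if h : xs = [] ∨ t = 0 then [] else xs.take t :: chunksRec t (xs.drop t)
termination_by xs.length
decreasing_by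
  have hx : xs ≠ [] := by tauto
  have ht : t ≠ 0 := by tauto
  have := List.length_pos_of_ne_nil hx
  simp only [List.length_drop]
  omega

theorem chunksRec_nil {α : Type} (t : Nat) : chunksRec t ([] : List α) = [] := by
  unfold chunksRec; simp

theorem chunksRec_cons {α : Type} (t : Nat) (ht : 0 < t) (xs : List α) (h : xs ≠ []) :
    chunksRec t xs = xs.take t :: chunksRec t (xs.drop t) := by
  rw [chunksRec, dif_neg (by push_neg; exact ⟨h, by omega⟩)]

theorem chunksRec_ne_nil {α : Type} (t : Nat) (ht : 0 < t) (xs : List α) (h : xs ≠ []) :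
    chunksRec t xs ≠ [] := by
  rw [chunksRec_cons t ht xs h]; simp

theorem chunksRec_map {α β : Type} (t : Nat) (ht : 0 < t) (f : α → β) :
    ∀ (N : Nat) (xs : List α), xs.length ≤ N →
      chunksRec t (xs.map f) = (chunksRec t xs).map (List.map f) := by
  intro N
  induction N with
  | zero =>
    intro xs h
    have hx : xs = [] := by
      cases xs with
      | nil => rfl
      | cons a as => simp at h
    subst hx; simp [chunksRec_nil]
  | succ n ih =>
    intro xs h
    by_cases hx : xs = []
    · subst hx; simp [chunksRec_nil]
    · have hmx : xs.map f ≠ [] := by simp [hx]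
      have hlen := List.length_pos_of_ne_nil hx
      rw [chunksRec_cons t ht _ hmx, chunksRec_cons t ht _ hx, List.map_cons,
        ← List.map_take, ← List.map_drop, ih (xs.drop t) (by simp only [List.length_drop]; omega)]

-- one chunk slice, in Nat form
theorem pv_slice_chunk {α : Type} (t k : Nat) (xs : List α) :
    PySem.List.slice xs (some ((t : Int) * ((k : Nat) : Int)))
        (some ((t : Int) * ((k : Nat) : Int) + (t : Int)))
      = (xs.drop (t * k)).take t := by
  have h1 : ((t : Int) * ((k : Nat) : Int)) = ((t * k : Nat) : Int) := by push_cast; ring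
  have h2 : ((t : Int) * ((k : Nat) : Int) + (t : Int)) = ((t * k + t : Nat) : Int) := by
    push_cast; ring
  rw [h2, h1, PySem.List.slice_natCast]
  congr 1
  omega

theorem pvChunks_cons {α : Type} (t : Nat) (T : Int) (hT : T = (t : Int)) (ht : 0 < t)
    (xs : List α) (h : xs ≠ []) :
    pvChunks T xs = xs.take t :: pvChunks T (xs.drop t) := by
  subst hT
  have htI : (0 : Int) < (t : Int) := by exact_mod_cast ht
  have hlen : 0 < xs.length := List.length_pos_of_ne_nil h
  unfold pvChunks
  rw [PySem.List.pyRange_of_pos _ _ htI, PySem.List.pyRange_of_pos _ _ htI]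
  rw [List.map_map, List.map_map]
  have key : ∀ (m : Nat),
      (if (0 : Int) < (m : Int) then (((m : Int) - 0 + (t : Int) - 1) / (t : Int)).toNat else 0)
        = (m + t - 1) / t := by
    intro m
    by_cases hm : 0 < m
    · rw [if_pos (by exact_mod_cast hm)]
      have hcast : ((m : Int) - 0 + (t : Int) - 1) = ((m + t - 1 : Nat) : Int) := by
        push_cast; omega
      rw [hcast, ← Int.natCast_div, Int.toNat_natCast]
    · have hm0 : m = 0 := by omega
      subst hm0
      rw [if_neg (by norm_num)]
      rw [Nat.div_eq_of_lt (by omega)]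
  rw [key, key]
  have hc : (xs.length + t - 1) / t = ((xs.drop t).length + t - 1) / t + 1 := by
    rw [List.length_drop]
    by_cases hle : xs.length ≤ t
    · have h1 : xs.length - t = 0 := by omega
      rw [h1]
      have h2 : (xs.length + t - 1) / t = 1 := Nat.div_eq_of_lt_le (by omega) (by omega)
      have h3 : (0 + t - 1) / t = 0 := Nat.div_eq_of_lt (by omega)
      omega
    · have heq : xs.length + t - 1 = (xs.length - t + t - 1) + t := by omega
      rw [heq, Nat.add_div_right _ ht]
  rw [hc, List.range_succ_eq_map, List.map_cons, List.map_map]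
  congr 1
  · have h0 := pv_slice_chunk t 0 xs
    simpa using h0
  · apply List.map_congr_left
    intro k _
    simp only [Function.comp_apply, Function.comp_def, zero_add, Nat.succ_eq_add_one]
    rw [pv_slice_chunk t (k + 1) xs, pv_slice_chunk t k (xs.drop t), List.drop_drop,
      show t * (k + 1) = t + t * k by ring]

theorem pvChunks_eq {α : Type} (t : Nat) (T : Int) (hT : T = (t : Int)) (ht : 0 < t)
    (xs : List α) : pvChunks T xs = chunksRec t xs := by
  have main : ∀ (N : Nat) (ys : List α), ys.length ≤ N → pvChunks T ys = chunksRec t ys := by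
    intro N
    induction N with
    | zero =>
      intro ys h
      have hy : ys = [] := by
        cases ys with
        | nil => rfl
        | cons a as => simp at h
      subst hy
      rw [chunksRec_nil]
      unfold pvChunks
      subst hT
      rw [PySem.List.pyRange_of_pos _ _ (by exact_mod_cast ht)]
      simp
    | succ n ih =>
      intro ys h
      by_cases hy : ys = []
      · subst hy
        rw [chunksRec_nil]
        unfold pvChunks
        subst hT
        rw [PySem.List.pyRange_of_pos _ _ (by exact_mod_cast ht)]
        simp
      · have hlen := List.length_pos_of_ne_nil hy
        rw [pvChunks_cons t T hT ht ys hy, chunksRec_cons t ht ys hy,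
          ih (ys.drop t) (by simp only [List.length_drop]; omega)]
  exact main xs.length xs le_rfl

-- fold over a zipIdx block where the separator condition never fires
theorem pv_nosep {α : Type} (t : Nat) (sep : String) (g : α → String) :
    ∀ (l : List (α × Nat)) (init : String),
      (∀ p ∈ l, ¬(t ∣ p.2 ∧ p.2 ≠ 0)) →
      l.foldl (fun acc p => (if t ∣ p.2 ∧ p.2 ≠ 0 then acc ++ sep else acc) ++ g p.1) init
        = init ++ PySem.Str.join "" ((l.map Prod.fst).map g) := by
  intro l
  induction l with
  | nil => intro init _; simp [pv_join_nil, pv_append_empty]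
  | cons p ps ih =>
    intro init h
    have hp : ¬(t ∣ p.2 ∧ p.2 ≠ 0) := h p (by simp)
    simp only [List.foldl_cons, if_neg hp]
    rw [ih _ (fun q hq => h q (by simp [hq]))]
    simp only [List.map_cons]
    rw [pv_join_empty_cons, String.append_assoc]

-- the main block decomposition of an index-modulo separated fold
theorem pv_zip_fold {α : Type} (t : Nat) (ht : 0 < t) (sep : String) (g : α → String) :
    ∀ (N : Nat) (xs : List α), xs.length ≤ N → ∀ (a : Nat), t ∣ a → ∀ (init : String),
      (xs.zipIdx a).foldl
          (fun acc p => (if t ∣ p.2 ∧ p.2 ≠ 0 then acc ++ sep else acc) ++ g p.1) init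
        = init ++ (if a ≠ 0 ∧ xs ≠ [] then sep else "") ++
            PySem.Str.join sep ((chunksRec t xs).map (fun ch => PySem.Str.join "" (ch.map g))) := by
  intro N
  induction N with
  | zero =>
    intro xs h a ha init
    have hx : xs = [] := by
      cases xs with
      | nil => rfl
      | cons b bs => simp at h
    subst hx
    simp [chunksRec_nil, pv_join_nil, pv_append_empty]
  | succ n ih =>
    intro xs h a ha init
    by_cases hx : xs = []
    · subst hx
      simp [chunksRec_nil, pv_join_nil, pv_append_empty]
    · obtain ⟨z, zs, rfl⟩ := List.exists_cons_of_ne_nil hx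
      obtain ⟨m, rfl⟩ : ∃ m, t = m + 1 := ⟨t - 1, by omega⟩
      set t := m + 1 with htm
      have htake : (z :: zs).take t = z :: zs.take m := by
        simp [htm, List.take_succ_cons]
      conv_lhs => rw [← List.take_append_drop t (z :: zs)]
      rw [List.zipIdx_append, List.foldl_append, htake, List.zipIdx_cons, List.foldl_cons]
      have hca : (t ∣ a ∧ a ≠ 0) ↔ (a ≠ 0) := ⟨fun hh => hh.2, fun hh => ⟨ha, hh⟩⟩
      rw [if_congr hca rfl rfl]
      have hnosep : ∀ p ∈ (zs.take m).zipIdx (a + 1), ¬(t ∣ p.2 ∧ p.2 ≠ 0) := by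
        rintro ⟨x, k⟩ hk ⟨hdvd, _⟩
        have hm := List.mem_zipIdx hk
        have hlt : (zs.take m).length ≤ m := by
          simp [List.length_take]
        obtain ⟨q1, hq1⟩ := hdvd
        obtain ⟨q2, hq2⟩ := ha
        have hql : q2 < q1 := Nat.lt_of_mul_lt_mul_left (a := t) (by omega)
        have h5 : t * (q2 + 1) ≤ t * q1 := Nat.mul_le_mul_left t hql
        rw [Nat.mul_add, Nat.mul_one] at h5
        omega
      rw [pv_nosep t sep g _ _ hnosep, pv_map_fst_zipIdx]
      -- second fold: over ((z :: zs).drop t).zipIdx (a + (take).length)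
      have hlentake : ((z :: zs).take t).length = min t (zs.length + 1) := by
        simp [List.length_take]
      by_cases hsmall : zs.length + 1 ≤ t
      · have hdrop : (z :: zs).drop t = [] := List.drop_eq_nil_iff.mpr (by simpa using hsmall)
        rw [hdrop]
        simp only [List.zipIdx_nil, List.foldl_nil]
        rw [chunksRec_cons t ht _ hx, hdrop, chunksRec_nil, htake]
        simp only [List.map_cons, List.map_nil]
        rw [pv_join_singleton, pv_join_empty_cons]
        have hzne : (z :: zs) ≠ [] := by simp
        simp only [ne_eq, hzne, not_false_eq_true, and_true]
        by_cases haz : a = 0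
        · simp [haz, pv_append_empty, pv_empty_append, String.append_assoc]
        · simp [haz, String.append_assoc]
      · have hdne : (z :: zs).drop t ≠ [] := by
          rw [Ne, List.drop_eq_nil_iff]; simp; omega
        have hoff : a + (z :: zs.take m).length = a + t := by
          simp only [List.length_cons, List.length_take]; omega
        rw [hoff,
          ih ((z :: zs).drop t) (by simp only [List.length_drop, List.length_cons] at h ⊢; omega)
            (a + t) (dvd_add ha dvd_rfl) _]
        rw [if_pos (show a + t ≠ 0 ∧ (z :: zs).drop t ≠ [] from ⟨by omega, hdne⟩)]
        rw [chunksRec_cons t ht _ hx, htake]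
        simp only [List.map_cons]
        rw [pv_join_cons_ne _ _ _ (by
          simp only [ne_eq, List.map_eq_nil_iff]
          exact chunksRec_ne_nil t ht _ hdne)]
        rw [pv_join_empty_cons]
        have hzne : (z :: zs) ≠ [] := by simp
        simp only [ne_eq, hzne, not_false_eq_true, and_true]
        by_cases haz : a = 0
        · simp [haz, pv_append_empty, pv_empty_append, String.append_assoc]
        · simp [haz, String.append_assoc]

-- index fold over pyRange = fold over zipIdx
theorem pv_idx_fold {α β : Type} (f : β → Int → α → β) (d : α) :
    ∀ (xs : List α) (init : β),
      (PySem.List.pyRange 0 (xs.length : Int) 1).foldl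
          (fun acc i => f acc i (PySem.List.pyGetD xs i d)) init
        = xs.zipIdx.foldl (fun acc p => f acc (p.2 : Int) p.1) init := by
  intro xs
  induction xs using List.reverseRecOn with
  | nil => intro init; simp [PySem.List.pyRange_one_eq_nil]
  | append_singleton ys x ih =>
    intro init
    have hlen : ((ys ++ [x]).length : Int) = (ys.length : Int) + 1 := by
      simp [List.length_append]
    rw [hlen, PySem.List.pyRange_one_succ_right (by exact_mod_cast Nat.zero_le _),
      List.foldl_append]
    have hcong : (PySem.List.pyRange 0 (ys.length : Int) 1).foldl
          (fun acc i => f acc i (PySem.List.pyGetD (ys ++ [x]) i d)) init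
        = (PySem.List.pyRange 0 (ys.length : Int) 1).foldl
          (fun acc i => f acc i (PySem.List.pyGetD ys i d)) init := by
      apply PySem.List.foldl_congr_mem
      intro acc i hi
      rw [PySem.List.mem_pyRange_one] at hi
      obtain ⟨h0, h1⟩ := hi
      rw [PySem.List.pyGetD_eq_getElem _ d h0 (by simp [List.length_append]; omega),
        PySem.List.pyGetD_eq_getElem _ d h0 (by exact_mod_cast h1)]
      have hilt : i.toNat < ys.length := by omega
      rw [List.getElem_append_left (bs := [x]) hilt]
    rw [hcong, ih]
    have hx : PySem.List.pyGetD (ys ++ [x]) ((ys.length : Nat) : Int) d = x := by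
      rw [PySem.List.pyGetD_eq_getElem _ d (by exact_mod_cast Nat.zero_le _)
        (by simp [List.length_append])]
      rw [List.getElem_append_right (by simp)]
      simp
    rw [List.zipIdx_append, List.foldl_append]
    simp [hx]

theorem pv_main {α : Type} (t : Nat) (T : Int) (hT : T = (t : Int)) (ht : 0 < t)
    (sep : String) (g : α → String) (d : α) (xs : List α) (init : String) :
    (PySem.List.pyRange 0 (xs.length : Int) 1).foldl
        (fun acc i =>
          (if PySem.Int.mod i T = 0 ∧ i ≠ 0 then acc ++ sep else acc)
            ++ g (PySem.List.pyGetD xs i d)) init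
      = init ++ PySem.Str.join sep ((chunksRec t xs).map (fun ch => PySem.Str.join "" (ch.map g))) := by
  have h0 := pv_idx_fold
    (fun acc i x => (if PySem.Int.mod i T = 0 ∧ i ≠ 0 then acc ++ sep else acc) ++ g x) d xs init
  rw [h0]
  have h1 : xs.zipIdx.foldl
        (fun acc p => (if PySem.Int.mod (p.2 : Int) T = 0 ∧ ((p.2 : Nat) : Int) ≠ 0 then acc ++ sep else acc) ++ g p.1) init
      = xs.zipIdx.foldl
        (fun acc p => (if t ∣ p.2 ∧ p.2 ≠ 0 then acc ++ sep else acc) ++ g p.1) init := by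
    apply List.foldl_ext
    intro acc p _
    congr 1
    have hiff : (PySem.Int.mod ((p.2 : Nat) : Int) T = 0 ∧ ((p.2 : Nat) : Int) ≠ 0)
        ↔ (t ∣ p.2 ∧ p.2 ≠ 0) := by
      rw [PySem.Int.mod_eq_zero_iff_dvd, hT]
      constructor
      · rintro ⟨hd, hz⟩
        exact ⟨by exact_mod_cast hd, by exact_mod_cast hz⟩
      · rintro ⟨hd, hz⟩
        exact ⟨by exact_mod_cast hd, by exact_mod_cast hz⟩
    rw [if_congr hiff rfl rfl]
  rw [h1, pv_zip_fold t ht sep g xs.length xs le_rfl 0 (dvd_zero t) init]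
  simp [pv_append_empty]

-- top-level assembly
theorem pv_formarRegion_eq (matriz : List (List Int)) (t : Nat)
    (hT : (if matriz.length = 9 then (3 : Int) else 2) = (t : Int)) (ht : 0 < t) :
    formarRegion matriz
      = PySem.Str.join
          (pvRepeat "- " ((if matriz.length = 9 then (3 : Int) else 2) * (if matriz.length = 9 then (3 : Int) else 2)
              + PySem.Int.floordiv (matriz.length : Int) (if matriz.length = 9 then (3 : Int) else 2) - 1) ++ "\n")
          ((chunksRec t matriz).map (fun ch => PySem.Str.join ""
            (ch.map (fun row => PySem.Str.join "| " ((chunksRec t row).map (fun ch2 => PySem.Str.join ""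
              (ch2.map (fun c => PySem.Int.toStr c ++ " ")))) ++ "\n")))) := by
  simp only [formarRegion]
  have hinner : ∀ (acc : String) (fila : Int),
      (let resultado :=
        if PySem.Int.mod fila (if matriz.length = 9 then (3 : Int) else 2) = 0 ∧ fila ≠ 0 then
          acc ++ pvRepeat "- " ((if matriz.length = 9 then (3 : Int) else 2) * (if matriz.length = 9 then (3 : Int) else 2)
            + PySem.Int.floordiv (matriz.length : Int) (if matriz.length = 9 then (3 : Int) else 2) - 1) ++ "\n"
        else acc
       let filaL := PySem.List.pyGetD matriz fila []
       let resultado2 :=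
        (PySem.List.pyRange 0 (filaL.length : Int) 1).foldl
          (fun res columna =>
            let res2 := if PySem.Int.mod columna (if matriz.length = 9 then (3 : Int) else 2) = 0 ∧ columna ≠ 0 then res ++ "| " else res
            res2 ++ PySem.Int.toStr (PySem.List.pyGetD filaL columna 0) ++ " ")
          resultado
       resultado2 ++ "\n")
      = (if PySem.Int.mod fila (if matriz.length = 9 then (3 : Int) else 2) = 0 ∧ fila ≠ 0 then
          acc ++ (pvRepeat "- " ((if matriz.length = 9 then (3 : Int) else 2) * (if matriz.length = 9 then (3 : Int) else 2)
            + PySem.Int.floordiv (matriz.length : Int) (if matriz.length = 9 then (3 : Int) else 2) - 1) ++ "\n")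
         else acc)
        ++ (PySem.Str.join "| " ((chunksRec t (PySem.List.pyGetD matriz fila [])).map (fun ch2 => PySem.Str.join ""
              (ch2.map (fun c => PySem.Int.toStr c ++ " ")))) ++ "\n") := by
    intro acc fila
    simp only []
    rw [List.foldl_ext _
      (fun res columna =>
        (if PySem.Int.mod columna (if matriz.length = 9 then (3 : Int) else 2) = 0 ∧ columna ≠ 0 then res ++ "| " else res)
          ++ ((fun c => PySem.Int.toStr c ++ " ") (PySem.List.pyGetD (PySem.List.pyGetD matriz fila []) columna 0)))
      _ (fun res col _ => by rw [String.append_assoc])]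
    rw [pv_main t _ hT ht "| " (fun c => PySem.Int.toStr c ++ " ") 0
      (PySem.List.pyGetD matriz fila []) _]
    split_ifs <;> simp [String.append_assoc]
  rw [List.foldl_ext _ _ _ (fun acc fila _ => hinner acc fila)]
  rw [pv_main t _ hT ht
    (pvRepeat "- " ((if matriz.length = 9 then (3 : Int) else 2) * (if matriz.length = 9 then (3 : Int) else 2)
        + PySem.Int.floordiv (matriz.length : Int) (if matriz.length = 9 then (3 : Int) else 2) - 1) ++ "\n")
    (fun row => PySem.Str.join "| " ((chunksRec t row).map (fun ch2 => PySem.Str.join ""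
        (ch2.map (fun c => PySem.Int.toStr c ++ " ")))) ++ "\n")
    ([] : List Int) matriz ""]
  rw [pv_empty_append]

theorem pv_formarRegion_alt_eq (matriz : List (List Int)) (t : Nat)
    (hT : (if matriz.length = 9 then (3 : Int) else 2) = (t : Int)) (ht : 0 < t) :
    formarRegion_alt matriz
      = PySem.Str.join
          (pvRepeat "- " ((if matriz.length = 9 then (3 : Int) else 2) * (if matriz.length = 9 then (3 : Int) else 2)
              + PySem.Int.floordiv (matriz.length : Int) (if matriz.length = 9 then (3 : Int) else 2) - 1) ++ "\n")
          ((chunksRec t matriz).map (fun ch => PySem.Str.join ""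
            (ch.map (fun row => PySem.Str.join "| " ((chunksRec t row).map (fun ch2 => PySem.Str.join ""
              (ch2.map (fun c => PySem.Int.toStr c ++ " ")))) ++ "\n")))) := by
  simp only [formarRegion_alt]
  simp only [pvChunks_eq t _ hT ht]
  rw [chunksRec_map t ht _ matriz.length matriz le_rfl]
  simp only [List.map_map, Function.comp_def]

-- ===== VERDICT (by name: the statement is the Claim_ definition above) =====
theorem formarRegion_spec : Claim_equal_formarRegion := by
  intro matriz _hd
  unfold Spec_formarRegion
  by_cases h9 : matriz.length = 9
  · rw [pv_formarRegion_eq matriz 3 (by simp [h9]) (by norm_num),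
      pv_formarRegion_alt_eq matriz 3 (by simp [h9]) (by norm_num)]
  · rw [pv_formarRegion_eq matriz 2 (by simp [h9]) (by norm_num),
      pv_formarRegion_alt_eq matriz 2 (by simp [h9]) (by norm_num)]
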